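-- pv_equiv track=rewrite | github.com/jaedsonpys/pie | pie/pie.py | get_lines_difference
-- ===== SOURCE A (Python) =====
-- def get_lines_difference(previous_lines: dict, current_lines: dict) -> dict:
--     """Gets the difference between two
--     dictionaries with numbered lines.
--
--     If there is a `None` value, it means
--     that the line has been deleted.
--
--     :param previous_lines: Preivous lines.
--     :type previous_lines: dict
--     :param current_lines: Current lines.
--     :type current_lines: dict
--     :return: Returns the difference between the two dictionaries.
--     :rtype: dict
--     """
--
--     diff = {}
--
--     # the following loop is needed to "remove" the
--     # lines that have been removed from the current file
--
--     for line, text in previous_lines.items():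
--         current_line = current_lines.get(line)
--
--         if current_line is None:
--             diff[line] = None
--         elif current_line != text:
--             diff[line] = text
--
--     # the loop below is needed to get new rows
--     # added that were not found in the first loop
--
--     for line, text in current_lines.items():
--         previous_line = previous_lines.get(line)
--
--         if previous_line is None:
--             diff[line] = text
--         elif previous_line != text:
--             diff[line] = text
--
--     return diff
-- ===== SOURCE B (Python) =====
-- def get_lines_difference(previous_lines: dict, current_lines: dict) -> dict:
--     """Single pass over the union of line numbers (previous order first, then
--     lines only in current) applying one uniform rule per line: absent from
--     current -> None (deleted); otherwise record the current text whenever it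
--     differs from the previous text (covers both changed and added lines)."""
--     order = list(previous_lines) + [k for k in current_lines if k not in previous_lines]
--     diff = {}
--     for line in order:
--         current = current_lines.get(line)
--         if current is None:
--             diff[line] = None
--         elif previous_lines.get(line) != current:
--             diff[line] = current
--     return diff
-- ===== Notes on version B (the rewrite author's own statement) =====
-- stated objective: simpler
-- what changed: Replaces A's two sequential dict-mutating passes (whose first-pass value for a changed line is redundantly overwritten by the second pass) with a single loop over the union of line numbers applying one uniform rule per line (deleted -> None, differing -> current text), with no overwrites.
import Mathlib
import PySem

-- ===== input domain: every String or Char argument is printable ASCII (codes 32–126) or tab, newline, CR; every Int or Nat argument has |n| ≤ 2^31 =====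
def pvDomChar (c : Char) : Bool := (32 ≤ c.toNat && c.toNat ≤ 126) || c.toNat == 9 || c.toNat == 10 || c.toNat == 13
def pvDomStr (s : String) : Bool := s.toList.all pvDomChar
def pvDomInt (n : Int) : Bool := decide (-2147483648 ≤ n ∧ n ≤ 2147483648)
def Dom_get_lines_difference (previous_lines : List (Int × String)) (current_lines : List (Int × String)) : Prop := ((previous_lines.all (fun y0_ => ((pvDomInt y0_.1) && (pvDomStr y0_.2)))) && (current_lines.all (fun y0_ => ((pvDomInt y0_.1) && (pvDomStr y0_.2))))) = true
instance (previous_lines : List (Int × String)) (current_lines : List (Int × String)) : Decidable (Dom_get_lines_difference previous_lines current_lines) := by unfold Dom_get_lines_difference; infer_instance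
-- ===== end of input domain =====

-- B replaces A's two dict-mutating passes (the second of which overwrites the first
-- pass's value for every changed line) with ONE loop over the union of line numbers
-- applying one uniform rule per line, with no overwrites — objective: simpler.

-- ===== PORT A =====
-- dict parameters become PySem.Dict (insertion order, unique keys) via ofList
def get_lines_difference (previous_lines : List (Int × String)) (current_lines : List (Int × String)) : List (Int × Option String) :=
  let pd := PySem.Dict.ofList previous_lines
  let cd := PySem.Dict.ofList current_lines
  -- diff = {}; for line, text in previous_lines.items(): …
  let diff : PySem.Dict Int (Option String) :=
    pd.items.foldl (fun diff lt =>
      match cd.get? lt.1 with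
      | none => diff.insert lt.1 none
      | some current_line =>
          if current_line ≠ lt.2 then diff.insert lt.1 (some lt.2) else diff)
      PySem.Dict.empty
  -- for line, text in current_lines.items(): …
  let diff :=
    cd.items.foldl (fun diff lt =>
      match pd.get? lt.1 with
      | none => diff.insert lt.1 (some lt.2)
      | some previous_line =>
          if previous_line ≠ lt.2 then diff.insert lt.1 (some lt.2) else diff)
      diff
  diff.items

-- ===== PORT B =====
-- order = list(previous_lines) + [k for k in current_lines if k not in previous_lines];
-- then one loop over order: deleted -> None, differing -> current text, else skip
def get_lines_difference_alt (previous_lines : List (Int × String)) (current_lines : List (Int × String)) : List (Int × Option String) :=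
  let pd := PySem.Dict.ofList previous_lines
  let cd := PySem.Dict.ofList current_lines
  let order := pd.keys ++ cd.keys.filter (fun k => !pd.contains k)
  let diff : PySem.Dict Int (Option String) :=
    order.foldl (fun diff line =>
      match cd.get? line with
      | none => diff.insert line none
      | some current =>
          if pd.get? line ≠ some current then diff.insert line (some current) else diff)
      PySem.Dict.empty
  diff.items

-- ===== PRECONDITION & SPEC =====
def Spec_get_lines_difference (previous_lines : List (Int × String)) (current_lines : List (Int × String)) (out : List (Int × Option String)) : Prop := out = get_lines_difference_alt previous_lines current_lines
instance (previous_lines : List (Int × String)) (current_lines : List (Int × String)) (out : List (Int × Option String)) : Decidable (Spec_get_lines_difference previous_lines current_lines out) := by unfold Spec_get_lines_difference; infer_instance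

-- ===== CLAIM (what is proved, stated in full; the proofs are below) =====
def Claim_equal_get_lines_difference : Prop := ∀ (previous_lines : List (Int × String)) (current_lines : List (Int × String)), Dom_get_lines_difference previous_lines current_lines → Spec_get_lines_difference previous_lines current_lines (get_lines_difference previous_lines current_lines)

-- ===== LEMMAS AND PROOFS =====

-- both ports are proved equal to this common normal form: the changed/deleted
-- entries (from previous order) followed by the added entries (in current order)
def pvChanged (pd cd : PySem.Dict Int String) : List (Int × Option String) :=
  pd.items.filterMap (fun lt =>
    if cd.get? lt.1 ≠ some lt.2 then some (lt.1, cd.get? lt.1) else none)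

def pvAdded (pd cd : PySem.Dict Int String) : List (Int × Option String) :=
  cd.items.filterMap (fun lt =>
    if pd.contains lt.1 then none else some (lt.1, some lt.2))

-- a filterMap over a filtered list equals one filterMap that is none off the filter
theorem pv_filterMap_filter {α β : Type} (p : α → Bool) (F G : α → Option β)
    (l : List α)
    (h1 : ∀ x ∈ l, p x = true → F x = G x)
    (h2 : ∀ x ∈ l, p x = false → G x = none) :
    (l.filter p).filterMap F = l.filterMap G := by
  induction l with
  | nil => rfl
  | cons a l ih =>
      have ih' := ih (fun x hx => h1 x (List.mem_cons_of_mem _ hx))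
        (fun x hx => h2 x (List.mem_cons_of_mem _ hx))
      cases hp : p a with
      | true =>
          rw [List.filter_cons_of_pos hp, List.filterMap_cons,
            h1 a List.mem_cons_self hp, List.filterMap_cons, ih']
      | false =>
          rw [List.filter_cons_of_neg (by simp [hp]), List.filterMap_cons,
            h2 a List.mem_cons_self hp, ih']

-- assoc-list lookup on a key absent from the key list
theorem pv_lookup_eq_none {ν : Type} (l : List (Int × ν)) (k : Int)
    (h : k ∉ l.map Prod.fst) : l.lookup k = none := by
  induction l with
  | nil => rfl
  | cons q l ih =>
      obtain ⟨a, b⟩ := q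
      simp only [List.map_cons, List.mem_cons, not_or] at h
      rw [List.lookup_cons, show (k == a) = false by simpa using h.1]
      exact ih h.2

-- assoc-list lookup finds the entry when keys are unique
theorem pv_lookup_eq_some {ν : Type} (l : List (Int × ν)) (k : Int) (v : ν)
    (hm : (k, v) ∈ l) (hn : (l.map Prod.fst).Nodup) : l.lookup k = some v := by
  induction l with
  | nil => cases hm
  | cons q l ih =>
      obtain ⟨a, b⟩ := q
      simp only [List.map_cons, List.nodup_cons] at hn
      rcases List.mem_cons.1 hm with h | h
      · obtain ⟨rfl, rfl⟩ := Prod.mk.inj h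
        rw [List.lookup_cons, show (k == k) = true by simp]
      · have hk : (k == a) = false := by
          refine beq_eq_false_iff_ne.2 (fun e => ?_)
          exact hn.1 (e ▸ (List.mem_map.2 ⟨(k, v), h, rfl⟩))
        rw [List.lookup_cons, hk]
        exact ih h hn.2

-- the keys of a key-preserving filterMap form a sublist of the original keys
theorem pv_keys_filterMap_sublist (l : List (Int × String))
    (g : (Int × String) → Option (Int × Option String))
    (hg : ∀ p r, g p = some r → r.1 = p.1) :
    ((l.filterMap g).map Prod.fst).Sublist (l.map Prod.fst) := by
  induction l with
  | nil => simp
  | cons q l ih =>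
      simp only [List.filterMap_cons, List.map_cons]
      cases hq : g q with
      | none => exact ih.cons q.1
      | some r =>
          simp only [List.map_cons, hg q r hq]
          exact ih.cons₂ q.1

-- first loop of A: over fresh distinct keys the conditional-insert loop appends
theorem pv_loop1 (cd : PySem.Dict Int String) (L : List (Int × String)) :
    ∀ (d : PySem.Dict Int (Option String)),
    (L.map Prod.fst).Nodup → (∀ p ∈ L, d.contains p.1 = false) →
    (L.foldl (fun diff lt =>
      match cd.get? lt.1 with
      | none => diff.insert lt.1 none
      | some c => if c ≠ lt.2 then diff.insert lt.1 (some lt.2) else diff) d).items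
    = d.items ++ L.filterMap (fun lt =>
      match cd.get? lt.1 with
      | none => some (lt.1, (none : Option String))
      | some c => if c ≠ lt.2 then some (lt.1, some lt.2) else none) := by
  induction L with
  | nil => intro d _ _; simp
  | cons q L ih =>
      intro d hn hf
      obtain ⟨k, t⟩ := q
      simp only [List.map_cons, List.nodup_cons] at hn
      have hfr : ∀ p ∈ L, p.1 ≠ k := by
        intro p hp e
        exact hn.1 (e ▸ (List.mem_map.2 ⟨p, hp, rfl⟩))
      have hk : d.contains k = false := hf (k, t) (List.mem_cons_self)
      have hnext : ∀ (v : Option String), ∀ p ∈ L,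
          (d.insert k v).contains p.1 = false := by
        intro v p hp
        rw [PySem.Dict.contains_insert]
        simp [hfr p hp, hf p (List.mem_cons_of_mem _ hp)]
      simp only [List.foldl_cons, List.filterMap_cons]
      cases hc : cd.get? k with
      | none =>
          rw [ih _ hn.2 (hnext none),
              PySem.Dict.items_insert_of_not_contains _ _ hk]
          simp
      | some c =>
          simp only [hc]
          by_cases he : c = t
          · rw [if_neg (by simp [he]), if_neg (by simp [he])]
            exact ih d hn.2 (fun p hp => hf p (List.mem_cons_of_mem _ hp))
          · rw [if_pos (by simpa using he), if_pos (by simpa using he),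
                ih _ hn.2 (hnext (some t)),
                PySem.Dict.items_insert_of_not_contains _ _ hk]
            simp

-- second loop of A: overwrites happen in place (described by a map over the
-- accumulated items), genuinely new keys are appended
theorem pv_loop2 (pd : PySem.Dict Int String) (C : List (Int × String)) :
    ∀ (d : PySem.Dict Int (Option String)),
    (C.map Prod.fst).Nodup →
    (∀ p ∈ C, pd.get? p.1 = none → d.contains p.1 = false) →
    (∀ p ∈ C, ∀ v, pd.get? p.1 = some v → v ≠ p.2 → d.contains p.1 = true) →
    (C.foldl (fun diff lt =>
      match pd.get? lt.1 with
      | none => diff.insert lt.1 (some lt.2)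
      | some pv => if pv ≠ lt.2 then diff.insert lt.1 (some lt.2) else diff) d).items
    = d.items.map (fun q =>
        match C.lookup q.1, pd.get? q.1 with
        | some t, some pv => if pv ≠ t then (q.1, some t) else q
        | _, _ => q)
      ++ C.filterMap (fun lt =>
        match pd.get? lt.1 with
        | none => some (lt.1, (some lt.2 : Option String))
        | some _ => none) := by
  induction C with
  | nil => intro d _ _ _; simp
  | cons q C ih =>
      intro d hn h0 h1
      obtain ⟨k, t⟩ := q
      simp only [List.map_cons, List.nodup_cons] at hn
      have hfr : ∀ p ∈ C, p.1 ≠ k := by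
        intro p hp e
        exact hn.1 (e ▸ (List.mem_map.2 ⟨p, hp, rfl⟩))
      have hlk : C.lookup k = none := pv_lookup_eq_none C k hn.1
      simp only [List.foldl_cons, List.filterMap_cons]
      cases hpk : pd.get? k with
      | none =>
          have hck : d.contains k = false := h0 (k, t) List.mem_cons_self hpk
          rw [ih (d.insert k (some t)) hn.2
              (fun p hp h => by
                rw [PySem.Dict.contains_insert]
                simp [hfr p hp, h0 p (List.mem_cons_of_mem _ hp) h])
              (fun p hp v hv hne => by
                rw [PySem.Dict.contains_insert]
                simp [h1 p (List.mem_cons_of_mem _ hp) v hv hne]),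
              PySem.Dict.items_insert_of_not_contains _ _ hck]
          rw [List.map_append]
          have hmapfun :
              (fun (q : Int × Option String) =>
                match C.lookup q.1, pd.get? q.1 with
                | some t, some pv => if pv ≠ t then (q.1, some t) else q
                | _, _ => q)
            = (fun (q : Int × Option String) =>
                match ((k, t) :: C).lookup q.1, pd.get? q.1 with
                | some t, some pv => if pv ≠ t then (q.1, some t) else q
                | _, _ => q) := by
            funext p
            by_cases hpkk : p.1 = k
            · rw [List.lookup_cons, show (p.1 == k) = true by simpa using hpkk,
                  hpkk, hpk, hlk]
            · rw [List.lookup_cons, show (p.1 == k) = false by simpa using hpkk]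
          rw [← hmapfun]
          simp [hlk]
      | some pv =>
          simp only [hpk]
          by_cases he : pv = t
          · rw [if_neg (by simp [he])]
            rw [ih d hn.2
                (fun p hp h => h0 p (List.mem_cons_of_mem _ hp) h)
                (fun p hp v hv hne => h1 p (List.mem_cons_of_mem _ hp) v hv hne)]
            have hmapfun :
                (fun (q : Int × Option String) =>
                  match C.lookup q.1, pd.get? q.1 with
                  | some t, some pv => if pv ≠ t then (q.1, some t) else q
                  | _, _ => q)
              = (fun (q : Int × Option String) =>
                  match ((k, t) :: C).lookup q.1, pd.get? q.1 with
                  | some t, some pv => if pv ≠ t then (q.1, some t) else q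
                  | _, _ => q) := by
              funext p
              by_cases hpkk : p.1 = k
              · rw [List.lookup_cons, show (p.1 == k) = true by simpa using hpkk,
                    hpkk, hpk, hlk]
                simp [he]
              · rw [List.lookup_cons, show (p.1 == k) = false by simpa using hpkk]
            rw [← hmapfun]
          · have hck : d.contains k = true := h1 (k, t) List.mem_cons_self pv hpk he
            rw [if_pos (by simpa using he)]
            rw [ih (d.insert k (some t)) hn.2
                (fun p hp h => by
                  rw [PySem.Dict.contains_insert]
                  simp [hfr p hp, h0 p (List.mem_cons_of_mem _ hp) h])
                (fun p hp v hv hne => by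
                  rw [PySem.Dict.contains_insert]
                  simp [h1 p (List.mem_cons_of_mem _ hp) v hv hne]),
                PySem.Dict.items_insert_of_contains _ _ hck]
            rw [List.map_map]
            have hmapfun :
                ((fun (q : Int × Option String) =>
                  match C.lookup q.1, pd.get? q.1 with
                  | some t, some pv => if pv ≠ t then (q.1, some t) else q
                  | _, _ => q)
                ∘ (fun (p : Int × Option String) =>
                    if (p.1 == k) = true then (k, some t) else p))
              = (fun (q : Int × Option String) =>
                  match ((k, t) :: C).lookup q.1, pd.get? q.1 with
                  | some t, some pv => if pv ≠ t then (q.1, some t) else q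
                  | _, _ => q) := by
              funext p
              by_cases hpkk : p.1 = k
              · simp [Function.comp, hpkk, hlk, hpk, he]
              · rw [List.lookup_cons, show (p.1 == k) = false by simpa using hpkk]
                simp [Function.comp, hpkk]
            rw [hmapfun]

-- A's two loops compose to the common normal form
theorem pv_A_eq (previous_lines current_lines : List (Int × String)) :
    get_lines_difference previous_lines current_lines
      = pvChanged (PySem.Dict.ofList previous_lines) (PySem.Dict.ofList current_lines)
        ++ pvAdded (PySem.Dict.ofList previous_lines) (PySem.Dict.ofList current_lines) := by
  simp only [get_lines_difference, pvChanged, pvAdded]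
  set pd := PySem.Dict.ofList previous_lines with hpd
  set cd := PySem.Dict.ofList current_lines with hcd
  have hpn : (pd.items.map Prod.fst).Nodup := PySem.Dict.nodup_keys_ofList previous_lines
  have hcn : (cd.items.map Prod.fst).Nodup := PySem.Dict.nodup_keys_ofList current_lines
  set g1 : (Int × String) → Option (Int × Option String) := fun lt =>
      match cd.get? lt.1 with
      | none => some (lt.1, (none : Option String))
      | some c => if c ≠ lt.2 then some (lt.1, some lt.2) else none with hg1
  set d1 : PySem.Dict Int (Option String) :=
    pd.items.foldl (fun diff lt =>
      match cd.get? lt.1 with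
      | none => diff.insert lt.1 none
      | some current_line =>
          if current_line ≠ lt.2 then diff.insert lt.1 (some lt.2) else diff)
      PySem.Dict.empty with hd1
  have hd1items : d1.items = pd.items.filterMap g1 := by
    rw [hd1, pv_loop1 cd pd.items PySem.Dict.empty hpn
        (fun p _ => PySem.Dict.contains_empty p.1)]
    rfl
  have hg1key : ∀ p r, g1 p = some r → r.1 = p.1 := by
    intro p r h
    simp only [hg1] at h
    cases hc : cd.get? p.1 with
    | none => simp only [hc] at h; cases h; rfl
    | some c =>
        simp only [hc] at h
        split_ifs at h with he
        · cases h
          rfl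
  have hd1keys : (d1.items.map Prod.fst).Sublist (pd.items.map Prod.fst) := by
    rw [hd1items]; exact pv_keys_filterMap_sublist pd.items g1 hg1key
  rw [pv_loop2 pd cd.items d1 hcn
      (fun p _ hnone => by
        rw [PySem.Dict.contains_eq_decide_mem_keys]
        have hnm : p.1 ∉ pd.keys := (PySem.Dict.get?_eq_none_iff_not_mem_keys pd p.1).1 hnone
        exact decide_eq_false (fun hm => hnm (hd1keys.mem hm)))
      (fun p hp v hv hne => by
        have h2 : cd.get? p.1 = some p.2 := PySem.Dict.get?_of_mem_items cd hp hcn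
        have hm : (p.1, v) ∈ pd.items := PySem.Dict.mem_items_of_get?_eq_some pd hv
        have hin : (p.1, some v) ∈ d1.items := by
          rw [hd1items]
          refine List.mem_filterMap.2 ⟨(p.1, v), hm, ?_⟩
          simp [hg1, h2, Ne.symm hne]
        exact (PySem.Dict.contains_iff_mem_keys d1 p.1).2
          (List.mem_map.2 ⟨(p.1, some v), hin, rfl⟩))]
  congr 1
  · -- changed part: (filterMap g1).map upd = pvChanged
    rw [hd1items, List.map_filterMap]
    refine List.filterMap_congr (fun lt hlt => ?_)
    have hget : pd.get? lt.1 = some lt.2 := PySem.Dict.get?_of_mem_items pd hlt hpn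
    cases hc : cd.get? lt.1 with
    | none =>
        have hlup : (cd.items).lookup lt.1 = none := by
          apply pv_lookup_eq_none
          intro hm
          exact ((PySem.Dict.get?_eq_none_iff_not_mem_keys cd lt.1).1 hc) hm
        simp [hg1, hc, hlup]
    | some c =>
        by_cases he : c = lt.2
        · simp [hg1, hc, he]
        · have hlup : (cd.items).lookup lt.1 = some c :=
            pv_lookup_eq_some cd.items lt.1 c
              (PySem.Dict.mem_items_of_get?_eq_some cd hc) hcn
          simp [hg1, hc, he, hlup, hget, Ne.symm he]
  · -- added part: new-key filterMap = pvAdded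
    refine List.filterMap_congr (fun lt _ => ?_)
    cases hp : pd.get? lt.1 with
    | none =>
        have h := (PySem.Dict.get?_eq_none_iff_contains pd lt.1).1 hp
        simp [h]
    | some v =>
        have h : pd.contains lt.1 = true := by
          rw [PySem.Dict.contains_eq_isSome_get?, hp]; rfl
        simp [h]

-- B's single loop over fresh distinct keys appends one entry per qualifying key
theorem pv_loopB (pd cd : PySem.Dict Int String) (L : List Int) :
    ∀ (d : PySem.Dict Int (Option String)),
    L.Nodup → (∀ k ∈ L, d.contains k = false) →
    (L.foldl (fun diff line =>
      match cd.get? line with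
      | none => diff.insert line none
      | some current =>
          if pd.get? line ≠ some current then diff.insert line (some current) else diff) d).items
    = d.items ++ L.filterMap (fun line =>
      match cd.get? line with
      | none => some (line, (none : Option String))
      | some current =>
          if pd.get? line ≠ some current then some (line, some current) else none) := by
  induction L with
  | nil => intro d _ _; simp
  | cons k L ih =>
      intro d hn hf
      simp only [List.nodup_cons] at hn
      have hk : d.contains k = false := hf k (List.mem_cons_self)
      have hnext : ∀ (v : Option String), ∀ j ∈ L,
          (d.insert k v).contains j = false := by
        intro v j hj
        rw [PySem.Dict.contains_insert]
        have : j ≠ k := fun e => hn.1 (e ▸ hj)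
        simp [this, hf j (List.mem_cons_of_mem _ hj)]
      simp only [List.foldl_cons, List.filterMap_cons]
      cases hc : cd.get? k with
      | none =>
          rw [ih _ hn.2 (hnext none),
              PySem.Dict.items_insert_of_not_contains _ _ hk]
          simp
      | some c =>
          simp only [hc]
          by_cases he : pd.get? k = some c
          · rw [if_neg (by simp [he]), if_neg (by simp [he])]
            exact ih d hn.2 (fun j hj => hf j (List.mem_cons_of_mem _ hj))
          · rw [if_pos (by simpa using he), if_pos (by simpa using he),
                ih _ hn.2 (hnext (some c)),
                PySem.Dict.items_insert_of_not_contains _ _ hk]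
            simp

-- B's result equals the common normal form
theorem pv_B_eq (previous_lines current_lines : List (Int × String)) :
    get_lines_difference_alt previous_lines current_lines
      = pvChanged (PySem.Dict.ofList previous_lines) (PySem.Dict.ofList current_lines)
        ++ pvAdded (PySem.Dict.ofList previous_lines) (PySem.Dict.ofList current_lines) := by
  simp only [get_lines_difference_alt, pvChanged, pvAdded]
  set pd := PySem.Dict.ofList previous_lines with hpd
  set cd := PySem.Dict.ofList current_lines with hcd
  have hpn : (pd.items.map Prod.fst).Nodup := PySem.Dict.nodup_keys_ofList previous_lines
  have hcn : (cd.items.map Prod.fst).Nodup := PySem.Dict.nodup_keys_ofList current_lines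
  set g : Int → Option (Int × Option String) := fun line =>
      match cd.get? line with
      | none => some (line, (none : Option String))
      | some current =>
          if pd.get? line ≠ some current then some (line, some current) else none with hg
  have hdisj : ∀ k ∈ (cd.keys.filter (fun k => !pd.contains k)), k ∉ pd.keys := by
    intro k hk
    have := (List.mem_filter.1 hk).2
    intro hm
    rw [(PySem.Dict.contains_iff_mem_keys pd k).2 hm] at this
    simp at this
  have hnodup : (pd.keys ++ cd.keys.filter (fun k => !pd.contains k)).Nodup := by
    refine List.Nodup.append hpn (List.Nodup.filter _ hcn) ?_
    intro k hk1 hk2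
    exact hdisj k hk2 hk1
  rw [pv_loopB pd cd (pd.keys ++ cd.keys.filter (fun k => !pd.contains k))
      PySem.Dict.empty hnodup (fun k _ => PySem.Dict.contains_empty k)]
  show [] ++ _ = _
  rw [List.nil_append, List.filterMap_append]
  congr 1
  · -- previous keys: filterMap over pd.keys = pvChanged
    show (pd.items.map Prod.fst).filterMap g = _
    rw [List.filterMap_map]
    refine List.filterMap_congr (fun lt hlt => ?_)
    have hget : pd.get? lt.1 = some lt.2 := PySem.Dict.get?_of_mem_items pd hlt hpn
    cases hc : cd.get? lt.1 with
    | none => simp [hg, Function.comp, hc]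
    | some c =>
        by_cases he : c = lt.2
        · simp [hg, Function.comp, hc, hget, he]
        · simp [hg, Function.comp, hc, hget, he, Ne.symm he]
  · -- current-only keys: filter-then-filterMap = pvAdded
    show ((cd.items.map Prod.fst).filter (fun k => !pd.contains k)).filterMap g = _
    rw [List.filter_map, List.filterMap_map]
    refine pv_filterMap_filter _ _ _ _ (fun lt hlt hp => ?_) (fun lt _ hp => ?_)
    · have hcont : pd.contains lt.1 = false := by simpa [Function.comp] using hp
      have hget : pd.get? lt.1 = none := by
        rw [PySem.Dict.get?_eq_none_iff_contains]; exact hcont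
      have hc : cd.get? lt.1 = some lt.2 := PySem.Dict.get?_of_mem_items cd hlt hcn
      simp [hg, Function.comp, hc, hget, hcont]
    · have : pd.contains lt.1 = true := by simpa [Function.comp] using hp
      simp [this]

-- ===== VERDICT (by name: the statement is the Claim_ definition above) =====
theorem get_lines_difference_spec : Claim_equal_get_lines_difference := by
  intro previous_lines current_lines _
  unfold Spec_get_lines_difference
  rw [pv_A_eq, pv_B_eq]
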